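-- pv_equiv track=rewrite | github.com/sugarl-sudo/seminar-2b | src/gen_data/relu.py | relu_forward
-- ===== SOURCE A (Python) =====
-- from typing import Iterable, Sequence
--
-- def relu_forward(inputs: Sequence[int]) -> list[int]:
--     """Compute cumulative ReLU outputs for ``inputs``."""
--     outputs = [0] * len(inputs)
--     if not inputs:
--         return outputs
--
--     outputs[0] = max(0, inputs[0])
--     for idx in range(1, len(inputs)):
--         outputs[idx] = max(0, outputs[idx - 1] + inputs[idx])
--     return outputs
-- ===== SOURCE B (Python) =====
-- def relu_forward(inputs):
--     """Cumulative ReLU via the closed-form identity acc_k = P_k - min(P_0..P_k)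
--     over prefix sums, instead of the clamped recurrence."""
--     prefixes = [0]
--     for x in inputs:
--         prefixes.append(prefixes[-1] + x)
--     mins = [prefixes[0]]
--     for p in prefixes[1:]:
--         mins.append(min(mins[-1], p))
--     return [p - m for p, m in zip(prefixes[1:], mins[1:])]
-- ===== Notes on version B (the rewrite author's own statement) =====
-- stated objective: alternative
-- what changed: Replaces the clamped recurrence max(0, prev+x) by the closed-form identity output_k = P_k - min(P_0..P_k) over prefix sums, computed in three staged passes (prefix sums, running minima, pointwise subtraction) with no max/clamping anywhere.
import Mathlib
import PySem

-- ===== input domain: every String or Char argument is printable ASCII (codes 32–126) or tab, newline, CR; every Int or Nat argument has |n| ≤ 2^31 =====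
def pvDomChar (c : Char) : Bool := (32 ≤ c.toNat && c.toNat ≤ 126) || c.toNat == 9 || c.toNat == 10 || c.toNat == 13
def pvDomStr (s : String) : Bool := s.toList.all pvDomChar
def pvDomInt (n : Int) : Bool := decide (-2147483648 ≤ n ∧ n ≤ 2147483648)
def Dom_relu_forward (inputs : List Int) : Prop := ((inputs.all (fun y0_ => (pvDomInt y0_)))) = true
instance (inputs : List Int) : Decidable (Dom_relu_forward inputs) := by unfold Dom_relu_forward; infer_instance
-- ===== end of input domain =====

-- B replaces A's clamped recurrence max(0, prev+x) by the closed-form identity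
-- output_k = P_k - min(P_0..P_k) over prefix sums (staged passes, no clamping); same O(n) cost.

-- ===== PORT A =====
-- inputs[0], outputs[idx-1], inputs[idx] are always in range here, so pyGetD is exact.
def relu_forward (inputs : List Int) : List Int :=
  let outputs := List.replicate inputs.length (0 : Int)
  if inputs = [] then outputs
  else
    let outputs := outputs.set 0 (max 0 (PySem.List.pyGetD inputs 0 0))
    (PySem.List.pyRange 1 (inputs.length : Int) 1).foldl
      (fun outs idx =>
        outs.set idx.toNat
          (max 0 (PySem.List.pyGetD outs (idx - 1) 0 + PySem.List.pyGetD inputs idx 0)))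
      outputs

-- ===== PORT B =====
-- prefixes[-1] / mins[-1] read the last element of a list that is never empty,
-- so getLast! is exact; prefixes[0] is head! of a nonempty list.
def relu_forward_alt (inputs : List Int) : List Int :=
  let prefixes := inputs.foldl (fun ps x => ps ++ [ps.getLast! + x]) [(0 : Int)]
  let mins := (prefixes.drop 1).foldl (fun ms p => ms ++ [min ms.getLast! p]) [prefixes.head!]
  (List.zip (prefixes.drop 1) (mins.drop 1)).map (fun z => z.1 - z.2)

-- ===== PRECONDITION & SPEC =====
def Spec_relu_forward (inputs : List Int) (out : List Int) : Prop := out = relu_forward_alt inputs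
instance (inputs : List Int) (out : List Int) : Decidable (Spec_relu_forward inputs out) := by unfold Spec_relu_forward; infer_instance

-- ===== CLAIM (what is proved, stated in full; the proofs are below) =====
def Claim_equal_relu_forward : Prop := ∀ (inputs : List Int), Dom_relu_forward inputs → Spec_relu_forward inputs (relu_forward inputs)

-- ===== LEMMAS AND PROOFS =====

/-- The sequence of values A's loop produces. -/
def pvScan (acc : Int) : List Int → List Int
  | [] => []
  | x :: t => max 0 (acc + x) :: pvScan (max 0 (acc + x)) t

theorem length_pvScan (acc : Int) (l : List Int) : (pvScan acc l).length = l.length := by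
  induction l generalizing acc with
  | nil => rfl
  | cons x t ih => simp [pvScan, ih]

theorem pvScan_snoc (acc x : Int) (l : List Int) :
    pvScan acc (l ++ [x])
      = pvScan acc l ++ [max 0 (l.foldl (fun a y => max 0 (a + y)) acc + x)] := by
  induction l generalizing acc with
  | nil => simp [pvScan]
  | cons y t ih => simp [pvScan, ih]

/-- Invariant of A's `for idx in range(1, len(inputs))` loop. -/
theorem loopA (x : Int) (t : List Int) (k : Nat) (h1 : 1 ≤ k) (hk : k ≤ t.length + 1) :
    (PySem.List.pyRange 1 (k : Int) 1).foldl
      (fun outs idx =>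
        outs.set idx.toNat
          (max 0 (PySem.List.pyGetD outs (idx - 1) 0 + PySem.List.pyGetD (x :: t) idx 0)))
      (max 0 x :: List.replicate t.length 0)
      = pvScan 0 ((x :: t).take k) ++ List.replicate (t.length + 1 - k) 0 := by
  induction k, h1 using Nat.le_induction with
  | base =>
    rw [show ((1 : Nat) : Int) = 1 by norm_num, PySem.List.pyRange_one_eq_nil le_rfl]
    simp [pvScan]
  | succ k hk1 ih =>
    have hkt : k ≤ t.length + 1 := by omega
    have hkl : k < (x :: t).length := by simp; omega
    rw [show ((k + 1 : Nat) : Int) = (k : Int) + 1 by push_cast; ring,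
        PySem.List.pyRange_one_succ_right (by exact_mod_cast hk1), List.foldl_append,
        ih hkt]
    have hlen : (pvScan 0 ((x :: t).take k)).length = k := by
      rw [length_pvScan, List.length_take]; simp; omega
    obtain ⟨j, rfl⟩ : ∃ j, k = j + 1 := ⟨k - 1, by omega⟩
    have htake : (x :: t).take (j + 1)
        = (x :: t).take j ++ (((x :: t)[j]?).toList) := List.take_add_one ..
    have hjl : j < (x :: t).length := by simp; omega
    have hget : (x :: t)[j]? = some ((x :: t)[j]'hjl) := List.getElem?_eq_getElem hjl
    have hread : PySem.List.pyGetD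
        (pvScan 0 ((x :: t).take (j + 1)) ++ List.replicate (t.length + 1 - (j + 1)) 0)
        (((j + 1 : Nat) : Int) - 1) 0
        = ((x :: t).take (j + 1)).foldl (fun a y => max 0 (a + y)) 0 := by
      rw [show (((j + 1 : Nat) : Int) - 1) = ((j : Nat) : Int) by push_cast; ring,
          PySem.List.pyGetD_natCast]
      rw [htake, hget, Option.toList_some, pvScan_snoc]
      have hlj : (pvScan 0 ((x :: t).take j)).length = j := by
        rw [length_pvScan, List.length_take]; simp; omega
      have h1 : j < (pvScan 0 ((x :: t).take j)
          ++ [max 0 ((((x :: t).take j).foldl (fun a y => max 0 (a + y)) 0) + (x :: t)[j]'hjl)]).length := by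
        simp [hlj]
      rw [List.getD_append _ _ _ _ h1, List.getD_eq_getElem _ _ h1, List.foldl_append]
      rw [List.getElem_append_right hlj.le]
      simp only [hlj, Nat.sub_self, List.getElem_cons_zero, List.foldl_cons, List.foldl_nil]
    have hin : PySem.List.pyGetD (x :: t) ((j + 1 : Nat) : Int) 0
        = (x :: t)[j + 1]'(by simp; omega) := by
      rw [PySem.List.pyGetD_natCast, List.getD_eq_getElem _ _ (by simp; omega)]
    push_cast at hread hin ⊢
    simp only [List.foldl_cons, List.foldl_nil]
    rw [hread, hin]
    rw [List.set_append, if_neg (by rw [hlen]; omega), hlen]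
    have hidx : (((j : Int) + 1).toNat - (j + 1)) = 0 := by omega
    have hrep : t.length - j = (t.length - (j + 1)) + 1 := by omega
    rw [hidx, hrep, List.replicate_succ, List.set_cons_zero]
    have htake2 : (x :: t).take (j + 1 + 1)
        = (x :: t).take (j + 1) ++ [(x :: t)[j + 1]'(by simp; omega)] := by
      rw [List.take_add_one, List.getElem?_eq_getElem (by simp; omega), Option.toList_some]
    rw [htake2, pvScan_snoc]
    simp

/-- The prefix-scan both B loops compute (B's `prefixes` and `mins` passes). -/
def pvScanl (f : Int -> Int -> Int) (b : Int) : List Int -> List Int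
  | [] => [b]
  | x :: t => b :: pvScanl f (f b x) t

/-- B's append-the-combined-last loop builds a scan. -/
theorem build_scanl (f : Int -> Int -> Int) (l : List Int) (a : List Int) (b : Int) :
    l.foldl (fun ps x => ps ++ [f ps.getLast! x]) (a ++ [b]) = a ++ pvScanl f b l := by
  induction l generalizing a b with
  | nil => simp [pvScanl]
  | cons x t ih =>
    have hlast : (a ++ [b]).getLast! = b := by simp
    simp only [List.foldl_cons, hlast, List.append_assoc]
    rw [show a ++ ([b] ++ [f b x]) = (a ++ [b]) ++ [f b x] by simp, ih]
    simp [pvScanl]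

/-- The zip of a list with the tail of its running-min scan, subtracted pointwise. -/
def pvGo (m : Int) : List Int -> List Int
  | [] => []
  | q :: qs => (q - min m q) :: pvGo (min m q) qs

theorem zip_minscan (qs : List Int) (m : Int) :
    (List.zip qs ((pvScanl min m qs).drop 1)).map (fun z => z.1 - z.2) = pvGo m qs := by
  induction qs generalizing m with
  | nil => rfl
  | cons q t ih =>
    have hs : pvScanl min (min m q) t = (min m q) :: (pvScanl min (min m q) t).drop 1 := by
      cases t <;> simp [pvScanl]
    rw [show pvScanl min m (q :: t) = m :: pvScanl min (min m q) t from rfl,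
        List.drop_succ_cons, List.drop_zero, hs]
    simp only [List.zip_cons_cons, List.map_cons, pvGo]
    rw [ih]

/-- The closed-form identity: prefix sum minus running minimum equals A's clamped scan. -/
theorem go_eq_scan (t : List Int) (P M : Int) (h : M <= P) :
    pvGo M ((pvScanl (fun a b => a + b) P t).drop 1) = pvScan (P - M) t := by
  induction t generalizing P M with
  | nil => rfl
  | cons x t ih =>
    have hs : pvScanl (fun a b : Int => a + b) P (x :: t)
        = P :: (P + x) :: (pvScanl (fun a b : Int => a + b) (P + x) t).drop 1 := by
      cases t <;> simp [pvScanl]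
    rw [hs]
    simp only [List.drop_succ_cons, List.drop_zero, pvGo, pvScan]
    have hval : P + x - min M (P + x) = max 0 (P - M + x) := by omega
    have hrec := ih (P + x) (min M (P + x)) (by omega)
    rw [hval, hrec, show max 0 (P - M + x) = P + x - min M (P + x) from hval.symm]

-- ===== VERDICT (by name: the statement is the Claim_ definition above) =====
theorem relu_forward_spec : Claim_equal_relu_forward := by
  intro inputs _
  unfold Spec_relu_forward relu_forward relu_forward_alt
  have hpre : inputs.foldl (fun ps x => ps ++ [ps.getLast! + x]) [(0 : Int)]
      = pvScanl (fun a b => a + b) 0 inputs := by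
    simpa using build_scanl (fun a b => a + b) inputs [] 0
  simp only [hpre]
  have hhead : (pvScanl (fun a b : Int => a + b) 0 inputs).head! = 0 := by
    cases inputs <;> simp [pvScanl]
  have hmins : ((pvScanl (fun a b : Int => a + b) 0 inputs).drop 1).foldl
      (fun ms p => ms ++ [min ms.getLast! p]) [(pvScanl (fun a b : Int => a + b) 0 inputs).head!]
      = pvScanl min 0 ((pvScanl (fun a b : Int => a + b) 0 inputs).drop 1) := by
    rw [hhead]
    simpa using build_scanl min ((pvScanl (fun a b : Int => a + b) 0 inputs).drop 1) [] 0
  simp only [hmins, zip_minscan, go_eq_scan inputs 0 0 le_rfl]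
  cases inputs with
  | nil => simp [pvScan]
  | cons x t =>
    rw [if_neg (by simp)]
    have h0 : PySem.List.pyGetD (x :: t) 0 0 = x := by
      simp [PySem.List.pyGetD, PySem.List.pyIdx?, PySem.List.pyGet?]
    rw [List.length_cons, List.replicate_succ, List.set_cons_zero, h0]
    have := loopA x t (t.length + 1) (by omega) le_rfl
    show List.foldl _ (max 0 x :: List.replicate t.length 0) _ = _
    rw [this]
    simp
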